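-- pv_equiv track=rewrite | github.com/gfagerlind/adventofcode | 14/nicesolve.py | istreelike
-- ===== SOURCE A (Python) =====
-- def istreelike(s):
--     q = 0
--     for p in s:
--         for x in range(-3, 3):
--             for y in range(-3, 3):
--                 if (p[0] + x, p[1] + y) in s:
--                     q += 1
--     return q
-- ===== SOURCE B (Python) =====
-- def istreelike(s):
--     # pairwise scan over distinct points instead of enumerating the 6x6 offset window
--     uniq = list(dict.fromkeys(s))
--     q = 0
--     for p in s:
--         for u in uniq:
--             if -3 <= u[0] - p[0] <= 2 and -3 <= u[1] - p[1] <= 2: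
--                 q += 1
--     return q
-- ===== Notes on version B (the rewrite author's own statement) =====
-- stated objective: alternative
-- what changed: Replaces the 6x6 offset-window enumeration with list membership tests by a pairwise scan of each point against the deduplicated point list, counting points whose coordinate differences fall in [-3,2].
import Mathlib
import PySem

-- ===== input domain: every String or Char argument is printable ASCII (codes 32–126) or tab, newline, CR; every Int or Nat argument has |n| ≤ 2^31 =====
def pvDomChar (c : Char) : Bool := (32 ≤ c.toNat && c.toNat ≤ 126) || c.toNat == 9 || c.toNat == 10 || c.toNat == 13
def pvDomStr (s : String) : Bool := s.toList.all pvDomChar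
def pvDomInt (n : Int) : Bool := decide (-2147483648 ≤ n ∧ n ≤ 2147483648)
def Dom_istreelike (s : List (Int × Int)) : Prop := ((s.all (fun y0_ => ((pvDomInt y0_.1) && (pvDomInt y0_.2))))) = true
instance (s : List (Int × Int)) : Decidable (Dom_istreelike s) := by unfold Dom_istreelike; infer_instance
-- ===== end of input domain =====

-- B replaces the 6x6 offset-window membership enumeration by a pairwise scan
-- against the deduplicated point list (alternative decomposition, same result).

-- ===== PORT A =====
def istreelike (s : List (Int × Int)) : Int :=
  s.foldl (fun q p =>
    (PySem.List.pyRange (-3) 3 1).foldl (fun q x =>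
      (PySem.List.pyRange (-3) 3 1).foldl (fun q y =>
        if (p.1 + x, p.2 + y) ∈ s then q + 1 else q) q) q) 0

-- ===== PORT B =====
def istreelike_alt (s : List (Int × Int)) : Int :=
  let uniq := PySem.List.dedup s
  s.foldl (fun q p =>
    uniq.foldl (fun q u =>
      if -3 ≤ u.1 - p.1 ∧ u.1 - p.1 ≤ 2 ∧ -3 ≤ u.2 - p.2 ∧ u.2 - p.2 ≤ 2
      then q + 1 else q) q) 0

-- ===== PRECONDITION & SPEC =====
def Spec_istreelike (s : List (Int × Int)) (out : Int) : Prop := out = istreelike_alt s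
instance (s : List (Int × Int)) (out : Int) : Decidable (Spec_istreelike s out) := by unfold Spec_istreelike; infer_instance

-- ===== CLAIM (what is proved, stated in full; the proofs are below) =====
def Claim_equal_istreelike : Prop := ∀ (s : List (Int × Int)), Dom_istreelike s → Spec_istreelike s (istreelike s)

-- ===== LEMMAS AND PROOFS =====

-- the candidate window coordinates A probes for a given point p
def pvCand (p : Int × Int) : List (Int × Int) :=
  (PySem.List.pyRange (-3) 3 1).flatMap (fun x =>
    (PySem.List.pyRange (-3) 3 1).map (fun y => (p.1 + x, p.2 + y)))

lemma pvMem_cand (p u : Int × Int) :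
    u ∈ pvCand p ↔ (-3 ≤ u.1 - p.1 ∧ u.1 - p.1 ≤ 2 ∧ -3 ≤ u.2 - p.2 ∧ u.2 - p.2 ≤ 2) := by
  simp only [pvCand, List.mem_flatMap, List.mem_map, PySem.List.mem_pyRange_one]
  constructor
  · rintro ⟨x, hx, y, hy, rfl⟩; simp; omega
  · rintro ⟨h1, h2, h3, h4⟩
    exact ⟨u.1 - p.1, by omega, u.2 - p.2, by omega, by simp⟩

lemma pvCand_nodup (p : Int × Int) : (pvCand p).Nodup := by
  rw [pvCand, List.nodup_flatMap]
  refine ⟨fun x _ => ?_, ?_⟩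
  · exact (PySem.List.nodup_pyRange_one _ _).map (by intro a b h; simpa using h)
  · refine (PySem.List.nodup_pyRange_one _ _).pairwise_of_forall_ne ?_
    intro x hx y hy hne u hu hv
    simp only [List.mem_map] at hu hv
    obtain ⟨a, _, rfl⟩ := hu
    obtain ⟨b, _, hb⟩ := hv
    apply hne
    have := congrArg Prod.fst hb
    simp at this; omega

-- countP symmetry between two nodup lists: both count the common elements
lemma pvCountP_comm {α : Type} [BEq α] [LawfulBEq α] (L M : List α) (hL : L.Nodup) (hM : M.Nodup) :
    L.countP (· ∈ M) = M.countP (· ∈ L) := by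
  classical
  rw [List.countP_eq_length_filter, List.countP_eq_length_filter]
  have h1 : (L.filter (· ∈ M)).toFinset = L.toFinset ∩ M.toFinset := by ext x; simp
  have h2 : (M.filter (· ∈ L)).toFinset = M.toFinset ∩ L.toFinset := by ext x; simp
  rw [← List.toFinset_card_of_nodup (hL.filter (· ∈ M)),
      ← List.toFinset_card_of_nodup (hM.filter (· ∈ L)), h1, h2, Finset.inter_comm]

lemma pvCountP_flatMap {α β : Type} (l : List α) (f : α → List β) (p : β → Bool) :
    (l.flatMap f).countP p = (l.map (fun x => (f x).countP p)).sum := by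
  induction l with
  | nil => simp
  | cons a t ih => simp [List.countP_append, ih]

-- per-point agreement: A's window probes count exactly B's distinct window points
lemma pvPerP (s : List (Int × Int)) (p : Int × Int) :
    (pvCand p).countP (· ∈ s)
      = (PySem.List.dedup s).countP
          (fun u => -3 ≤ u.1 - p.1 ∧ u.1 - p.1 ≤ 2 ∧ -3 ≤ u.2 - p.2 ∧ u.2 - p.2 ≤ 2) := by
  have h1 : (pvCand p).countP (· ∈ s) = (pvCand p).countP (· ∈ PySem.List.dedup s) :=
    List.countP_congr (fun u _ => by simp)
  have h2 := pvCountP_comm (pvCand p) (PySem.List.dedup s) (pvCand_nodup p) (PySem.List.nodup_dedup s)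
  have h3 : (PySem.List.dedup s).countP (· ∈ pvCand p)
      = (PySem.List.dedup s).countP
          (fun u => -3 ≤ u.1 - p.1 ∧ u.1 - p.1 ≤ 2 ∧ -3 ≤ u.2 - p.2 ∧ u.2 - p.2 ≤ 2) :=
    List.countP_congr (fun u _ => by simp [pvMem_cand])
  exact (h1.trans h2).trans h3

-- ===== VERDICT (by name: the statement is the Claim_ definition above) =====
theorem istreelike_spec : Claim_equal_istreelike := by
  intro s _
  unfold Spec_istreelike
  simp only [istreelike, istreelike_alt]
  simp only [PySem.List.foldl_ite_add_one, PySem.List.foldl_add]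
  simp only [zero_add]
  refine congrArg (List.sum (α := Int)) (List.map_congr_left ?_)
  intro p _
  have h := pvPerP s p
  rw [pvCand, pvCountP_flatMap] at h
  rw [← h, Nat.cast_list_sum, List.map_map]
  rfl
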